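-- pv_equiv track=rewrite | github.com/NEELSAMEL23/DSA | 11.Stack/Python/HungryEmployees.py | hungry_employees
-- ===== SOURCE A (Python) =====
-- from collections import deque
--
-- def hungry_employees(n, employees, meals):
--     employees = deque(employees)
--     meals = meals[::-1]  # Reverse meals so we can use it as a stack (top at end)
--
--     attempts = 0  # Track failed matches in a row
--
--     while employees and meals:
--         if employees[0] == meals[-1]:
--             employees.popleft()
--             meals.pop()
--             attempts = 0  # Reset attempts after a successful match
--         else:
--             employees.append(employees.popleft())
--             attempts += 1
--
--         if attempts == len(employees):  # No match in full cycle
--             break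
--
--     return len(employees)
-- ===== SOURCE B (Python) =====
-- from collections import Counter
--
-- def hungry_employees(n, employees, meals):
--     remaining = Counter(employees)
--     served = 0
--     for m in meals:
--         if remaining[m] > 0:
--             remaining[m] -= 1
--             served += 1
--         else:
--             break
--     return len(employees) - served
-- ===== Notes on version B (the rewrite author's own statement) =====
-- stated objective: alternative
-- what changed: Replaces the rotating-queue simulation (rotate the employee deque until the front matches the top meal, break after a fruitless full cycle) by a single pass over meals with a Counter of employee preferences: serve from the counts until a meal finds no taker.
import Mathlib
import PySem

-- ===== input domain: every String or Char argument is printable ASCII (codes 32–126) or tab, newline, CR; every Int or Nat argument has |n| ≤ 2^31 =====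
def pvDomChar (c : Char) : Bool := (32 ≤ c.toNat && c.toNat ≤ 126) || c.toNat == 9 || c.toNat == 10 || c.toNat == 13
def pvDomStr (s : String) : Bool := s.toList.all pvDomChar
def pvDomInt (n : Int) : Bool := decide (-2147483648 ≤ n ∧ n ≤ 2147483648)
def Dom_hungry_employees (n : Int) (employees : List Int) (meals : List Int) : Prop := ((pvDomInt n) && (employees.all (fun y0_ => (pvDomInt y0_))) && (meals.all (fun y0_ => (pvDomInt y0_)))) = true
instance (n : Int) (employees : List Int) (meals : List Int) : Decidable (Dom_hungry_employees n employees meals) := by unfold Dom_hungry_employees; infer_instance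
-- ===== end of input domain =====

-- B replaces A's rotating-queue simulation by a single pass over meals with a Counter
-- of employee preferences (objective: alternative algorithm; not measured faster).

-- ===== PORT A =====
-- A's while loop: employees is the deque (front = head), meals reversed (top = last),
-- attempts counts mismatches since the last match.  Python breaks when
-- attempts == len(employees); since attempts never exceeds len(employees) between
-- matches (it is reset to 0 on a match and the break fires at equality), the test is
-- written '≤' here, which is the same test on every reachable state and makes
-- termination evident.
def hungryLoopA : List Int → List Int → Nat → Int
  | [], _, _ => 0
  | e :: rest, meals, attempts =>
    if hne : meals = [] then ((e :: rest).length : Int)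
    else
      if e = meals.getLast hne then
        hungryLoopA rest meals.dropLast 0
      else
        if (rest ++ [e]).length ≤ attempts + 1 then ((rest ++ [e]).length : Int)
        else hungryLoopA (rest ++ [e]) meals (attempts + 1)
  termination_by emps meals attempts => (meals.length, emps.length - attempts)
  decreasing_by
  · left
    have : 0 < meals.length := List.length_pos_of_ne_nil hne
    simp [List.length_dropLast]; omega
  · right
    rename_i hb
    simp only [List.length_append, List.length_cons, List.length_nil] at hb ⊢
    omega

def hungry_employees (_n : Int) (employees : List Int) (meals : List Int) : Int :=
  -- meals[::-1] is List.reverse (PySem.List.slice?_none_none_neg_one)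
  hungryLoopA employees meals.reverse 0

-- ===== PORT B =====
def hungryLoopB : PySem.Dict Int Int → List Int → Int → Int
  | _, [], served => served
  | remaining, m :: ms, served =>
    if remaining.getD m 0 > 0 then
      hungryLoopB (remaining.insert m (remaining.getD m 0 - 1)) ms (served + 1)
    else served

def hungry_employees_alt (_n : Int) (employees : List Int) (meals : List Int) : Int :=
  (employees.length : Int) - hungryLoopB (PySem.Dict.counter employees) meals 0

-- ===== PRECONDITION & SPEC =====
def Spec_hungry_employees (n : Int) (employees : List Int) (meals : List Int) (out : Int) : Prop := out = hungry_employees_alt n employees meals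
instance (n : Int) (employees : List Int) (meals : List Int) (out : Int) : Decidable (Spec_hungry_employees n employees meals out) := by unfold Spec_hungry_employees; infer_instance

-- ===== CLAIM (what is proved, stated in full; the proofs are below) =====
def Claim_equal_hungry_employees : Prop := ∀ (n : Int) (employees : List Int) (meals : List Int), Dom_hungry_employees n employees meals → Spec_hungry_employees n employees meals (hungry_employees n employees meals)

-- ===== LEMMAS AND PROOFS =====

-- With no meals left, A returns the queue length.
lemma loopA_nil (q : List Int) (a : Nat) : hungryLoopA q [] a = (q.length : Int) := by
  cases q <;> simp [hungryLoopA]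

-- B's served accumulator is a plain offset.
lemma loopB_add (ms : List Int) (d : PySem.Dict Int Int) (s : Int) :
    hungryLoopB d ms s = s + hungryLoopB d ms 0 := by
  induction ms generalizing d s with
  | nil => simp [hungryLoopB]
  | cons m ms ih =>
    simp only [hungryLoopB]
    split_ifs with h
    · rw [ih _ (s + 1), ih _ (0 + 1)]; ring
    · ring

-- If no employee wants the top meal, A rotates a full cycle and stops.
lemma loopA_no_match (k : Nat) :
    ∀ (q R : List Int) (m : Int) (a : Nat), q.length - a = k → m ∉ q → a < q.length →
      hungryLoopA q (R ++ [m]) a = (q.length : Int) := by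
  induction k with
  | zero => intro q R m a hk _ ha; omega
  | succ k ih =>
    intro q R m a hk hm ha
    match q with
    | [] => simp at ha
    | e :: rest =>
      have hne : e ≠ m := by intro h; exact hm (h ▸ List.mem_cons_self)
      rw [hungryLoopA, dif_neg (by simp : ¬ R ++ [m] = [])]
      rw [List.getLast_concat, if_neg hne]
      by_cases hb : (rest ++ [e]).length ≤ a + 1
      · rw [if_pos hb]; simp
      · rw [if_neg hb]
        have hlen : (rest ++ [e]).length = (e :: rest).length := by simp
        rw [ih (rest ++ [e]) R m (a + 1) (by omega) (by
          intro hc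
          rcases List.mem_append.1 hc with h | h
          · exact hm (List.mem_cons_of_mem _ h)
          · simp only [List.mem_singleton] at h; exact hne h.symm) (by omega), hlen]

-- If some employee wants the top meal, A rotates to the first such employee, serves
-- him, and continues with the rotated remainder and the remaining meals.
lemma loopA_match (i : Nat) :
    ∀ (q R : List Int) (m : Int) (a : Nat), q.idxOf m = i → m ∈ q → a + q.idxOf m < q.length →
      hungryLoopA q (R ++ [m]) a =
        hungryLoopA (q.drop (q.idxOf m + 1) ++ q.take (q.idxOf m)) R 0 := by
  induction i with
  | zero =>
    intro q R m a hi hm ha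
    match q with
    | [] => simp at hm
    | e :: rest =>
      have he : e = m := by
        by_contra h
        simp [h] at hi
      rw [hungryLoopA, dif_neg (by simp : ¬ R ++ [m] = [])]
      rw [List.getLast_concat, if_pos he, hi, List.dropLast_concat]
      simp
  | succ i ih =>
    intro q R m a hi hm ha
    match q with
    | [] => simp at hm
    | e :: rest =>
      have hne : e ≠ m := by
        intro h; simp [h] at hi
      have hmr : m ∈ rest := by
        rcases List.mem_cons.1 hm with h | h
        · exact absurd h.symm hne
        · exact h
      have hir : rest.idxOf m = i := by
        simp [hne] at hi; omega
      have hidx : (rest ++ [e]).idxOf m = rest.idxOf m := List.idxOf_append_of_mem hmr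
      have hilt : rest.idxOf m < rest.length := List.idxOf_lt_length_of_mem hmr
      have hq : (e :: rest).idxOf m = rest.idxOf m + 1 := by
        simp [hne]
      rw [hungryLoopA, dif_neg (by simp : ¬ R ++ [m] = [])]
      rw [List.getLast_concat, if_neg hne]
      have hb : ¬ (rest ++ [e]).length ≤ a + 1 := by
        simp only [List.length_append, List.length_singleton]
        simp only [hq, List.length_cons] at ha
        omega
      rw [if_neg hb]
      rw [ih (rest ++ [e]) R m (a + 1) (hidx.trans hir) (List.mem_append_left _ hmr)
        (by simp only [hidx, hir, List.length_append, List.length_singleton]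
            simp only [hq, hir, List.length_cons] at ha; omega)]
      congr 1
      rw [hidx, hq]
      rw [List.drop_append_of_le_length (by omega), List.take_append_of_le_length (by omega)]
      rw [List.drop_succ_cons, List.take_succ_cons, List.append_assoc]
      simp

-- Counts of the rotated remainder: one fewer m, everything else unchanged.
lemma count_rotated (q : List Int) (m k : Int) (hm : m ∈ q) :
    (q.drop (q.idxOf m + 1) ++ q.take (q.idxOf m)).count k
      = q.count k - (if k = m then 1 else 0) := by
  have hi : q.idxOf m < q.length := List.idxOf_lt_length_of_mem hm
  have hdrop : q.drop (q.idxOf m) = m :: q.drop (q.idxOf m + 1) := by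
    rw [List.drop_eq_getElem_cons hi, List.getElem_idxOf hi]
  have hq : q = q.take (q.idxOf m) ++ (m :: q.drop (q.idxOf m + 1)) := by
    rw [← hdrop, List.take_append_drop]
  rw [List.count_append]
  conv_rhs => rw [hq]
  rw [List.count_append, List.count_cons]
  rcases eq_or_ne k m with h | h
  · simp [h]; omega
  · simp [h, Ne.symm h]; omega

-- Main invariant: A on queue q with reversed meals equals |q| minus B's served count,
-- for any dict whose counts agree with q.
lemma main_inv (ms : List Int) :
    ∀ (q : List Int) (d : PySem.Dict Int Int),
      (∀ k : Int, d.getD k 0 = (q.count k : Int)) →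
      hungryLoopA q ms.reverse 0 = (q.length : Int) - hungryLoopB d ms 0 := by
  induction ms with
  | nil => intro q d _; simp [loopA_nil, hungryLoopB]
  | cons m ms ih =>
    intro q d hd
    rw [List.reverse_cons]
    by_cases hm : m ∈ q
    · have hcnt : 0 < q.count m := List.count_pos_iff.2 hm
      have hi : q.idxOf m < q.length := List.idxOf_lt_length_of_mem hm
      rw [loopA_match (q.idxOf m) q ms.reverse m 0 rfl hm (by omega)]
      have hd'c : ∀ k : Int,
          (d.insert m (d.getD m 0 - 1)).getD k 0
            = ((q.drop (q.idxOf m + 1) ++ q.take (q.idxOf m)).count k : Int) := by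
        intro k
        rw [PySem.Dict.getD_insert, count_rotated q m k hm]
        rcases eq_or_ne k m with h | h
        · simp [h, hd m]; omega
        · simp [h, hd k]
      rw [ih _ _ hd'c]
      have hlen : (q.drop (q.idxOf m + 1) ++ q.take (q.idxOf m)).length = q.length - 1 := by
        simp only [List.length_append, List.length_drop, List.length_take]
        omega
      have hBd : hungryLoopB d (m :: ms) 0
          = 1 + hungryLoopB (d.insert m (d.getD m 0 - 1)) ms 0 := by
        simp only [hungryLoopB]
        rw [if_pos (by rw [hd m]; exact_mod_cast hcnt), loopB_add]
        ring
      rw [hBd, hlen]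
      have h1 : 1 ≤ q.length := by omega
      push_cast [Nat.cast_sub h1]
      ring
    · have hcnt : q.count m = 0 := List.count_eq_zero.2 hm
      have hB : hungryLoopB d (m :: ms) 0 = 0 := by
        simp only [hungryLoopB]
        rw [if_neg (by rw [hd m, hcnt]; simp)]
      rw [hB]
      match q with
      | [] => simp [hungryLoopA]
      | e :: rest =>
        rw [loopA_no_match ((e :: rest).length - 0) (e :: rest) ms.reverse m 0 rfl hm (by simp)]
        ring

-- ===== VERDICT (by name: the statement is the Claim_ definition above) =====
theorem hungry_employees_spec : Claim_equal_hungry_employees := by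
  intro n employees meals _
  show hungry_employees n employees meals = hungry_employees_alt n employees meals
  unfold hungry_employees hungry_employees_alt
  rw [main_inv meals employees (PySem.Dict.counter employees)
    (fun k => PySem.Dict.getD_counter employees k)]
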